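-- pv_equiv track=rewrite | github.com/KyleDawson24/fantasy-league-front-page | output/generate_records_report.py | split_tiers
-- ===== SOURCE A (Python) =====
-- def split_tiers(rows):
--     """Group consecutive rows with identical stat_value (rows assumed sorted by rank asc)."""
--     if not rows:
--         return []
--     tiers = [[rows[0]]]
--     for row in rows[1:]:
--         if row['stat_value'] == tiers[-1][0]['stat_value']:
--             tiers[-1].append(row)
--         else:
--             tiers.append([row])
--     return tiers
-- ===== SOURCE B (Python) =====
-- def split_tiers(rows):
--     """Group consecutive rows with identical stat_value (rows assumed sorted by rank asc)."""
--     tiers = []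
--     i, n = 0, len(rows)
--     while i < n:
--         k = rows[i]['stat_value']
--         j = i + 1
--         while j < n and rows[j]['stat_value'] == k:
--             j += 1
--         tiers.append(rows[i:j])
--         i = j
--     return tiers
-- ===== Notes on version B (the rewrite author's own statement) =====
-- stated objective: alternative
-- what changed: B scans each run of equal stat_value with a two-pointer inner loop and emits the whole run as one slice, instead of A's append-to-tiers[-1] accumulator that compares every row to the current tier's first element. Pre_ excludes rows missing the 'stat_value' key, where both raise KeyError except for the single-row case, where A accidentally never performs the lookup and returns while B raises.
-- outside the precondition, e.g. on split_tiers([{}]): A returns [[{}]], B raises KeyError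
import Mathlib
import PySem

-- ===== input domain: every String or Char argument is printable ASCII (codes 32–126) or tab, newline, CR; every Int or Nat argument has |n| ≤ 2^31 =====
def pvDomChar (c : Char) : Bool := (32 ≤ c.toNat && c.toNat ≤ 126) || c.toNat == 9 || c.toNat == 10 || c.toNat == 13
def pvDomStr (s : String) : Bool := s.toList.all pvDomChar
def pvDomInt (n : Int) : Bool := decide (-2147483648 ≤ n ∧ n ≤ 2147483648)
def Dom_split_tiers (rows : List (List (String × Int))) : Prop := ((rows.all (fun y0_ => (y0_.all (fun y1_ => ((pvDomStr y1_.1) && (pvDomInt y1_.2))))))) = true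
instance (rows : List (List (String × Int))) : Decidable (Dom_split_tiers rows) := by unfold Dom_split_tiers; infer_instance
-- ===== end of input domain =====

-- B replaces A's append-to-last-tier accumulator by a run scanner that emits each
-- maximal run of equal stat_value as one slice (objective: alternative decomposition).
-- row['stat_value']: first matching key of the association list (KeyError = none).
def pvKey (row : List (String × Int)) : Option Int := List.lookup "stat_value" row

-- ===== PORT A =====
def split_tiers (rows : List (List (String × Int))) : List (List (List (String × Int))) :=
  match rows with
  | [] => []                                   -- if not rows: return []
  | r :: rest =>                               -- tiers = [[rows[0]]]; for row in rows[1:]: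
    rest.foldl (fun tiers row =>
      if pvKey row = pvKey ((tiers.getLastD []).headD []) then   -- row['stat_value'] == tiers[-1][0]['stat_value']
        tiers.dropLast ++ [tiers.getLastD [] ++ [row]]           -- tiers[-1].append(row)
      else
        tiers ++ [[row]])                                        -- tiers.append([row])
      [[r]]

-- ===== PORT B =====
-- transcription of Source B's two-pointer scan: the inner 'while' collecting the run of
-- equal keys is takeWhile/dropWhile over the remaining suffix, the outer 'while' the recursion.
def split_tiers_alt (rows : List (List (String × Int))) : List (List (List (String × Int))) :=
  match rows with
  | [] => []
  | r :: rest =>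
    (r :: rest.takeWhile (fun x => pvKey x == pvKey r)) ::
      split_tiers_alt (rest.dropWhile (fun x => pvKey x == pvKey r))
termination_by rows.length
decreasing_by
  simp only [List.length_cons]
  exact Nat.lt_succ_of_le (List.length_dropWhile_le _ _)

-- ===== PRECONDITION & SPEC =====
-- Pre_ excludes rows lacking a 'stat_value' key: both raise KeyError there, except a
-- single missing-key row, where A accidentally skips the lookup and returns while B raises.
def Pre_split_tiers (rows : List (List (String × Int))) : Prop :=
  (rows.all (fun r => (pvKey r).isSome)) = true
instance (rows : List (List (String × Int))) : Decidable (Pre_split_tiers rows) := by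
  unfold Pre_split_tiers; infer_instance

def pvWitness_split_tiers : (List (List (String × Int))) :=
  [[("stat_value", 3), ("team", 7)], [("stat_value", 3)], [("stat_value", 1)]]

def Spec_split_tiers (rows : List (List (String × Int))) (out : List (List (List (String × Int)))) : Prop := out = split_tiers_alt rows
instance (rows : List (List (String × Int))) (out : List (List (List (String × Int)))) : Decidable (Spec_split_tiers rows out) := by unfold Spec_split_tiers; infer_instance

-- ===== CLAIM (what is proved, stated in full; the proofs are below) =====
def Claim_equal_split_tiers : Prop := ∀ (rows : List (List (String × Int))), Dom_split_tiers rows → Pre_split_tiers rows → Spec_split_tiers rows (split_tiers rows)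

-- ===== LEMMAS AND PROOFS =====

-- A's loop body, named for the proofs
def pvStep (tiers : List (List (List (String × Int)))) (row : List (String × Int)) :
    List (List (List (String × Int))) :=
  if pvKey row = pvKey ((tiers.getLastD []).headD []) then
    tiers.dropLast ++ [tiers.getLastD [] ++ [row]]
  else
    tiers ++ [[row]]

-- A's loop, rephrased on (finished tiers, current tier) instead of a flat list
def pvRuns (cur : List (List (String × Int))) (rest : List (List (String × Int))) :
    List (List (List (String × Int))) :=
  match rest with
  | [] => [cur]
  | row :: rest' =>
    if pvKey row = pvKey (cur.headD []) then pvRuns (cur ++ [row]) rest'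
    else cur :: pvRuns [row] rest'

lemma foldl_step_eq_runs (rest : List (List (String × Int)))
    (ts : List (List (List (String × Int)))) (cur : List (List (String × Int))) :
    List.foldl pvStep (ts ++ [cur]) rest = ts ++ pvRuns cur rest := by
  induction rest generalizing ts cur with
  | nil => simp [pvRuns]
  | cons row rest' ih =>
    simp only [List.foldl_cons, pvRuns]
    have hstep : pvStep (ts ++ [cur]) row =
        if pvKey row = pvKey (cur.headD []) then ts ++ [cur ++ [row]]
        else (ts ++ [cur]) ++ [[row]] := by
      simp [pvStep]
    by_cases h : pvKey row = pvKey (cur.headD [])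
    · rw [hstep, if_pos h, if_pos h, ih]
    · rw [hstep, if_neg h, if_neg h, ih, List.append_assoc]
      simp

lemma runs_eq_alt (rest : List (List (String × Int))) (r : List (String × Int))
    (pre : List (List (String × Int))) :
    pvRuns (r :: pre) rest =
      ((r :: pre) ++ rest.takeWhile (fun x => pvKey x == pvKey r)) ::
        split_tiers_alt (rest.dropWhile (fun x => pvKey x == pvKey r)) := by
  induction rest generalizing r pre with
  | nil => simp [pvRuns, split_tiers_alt]
  | cons row rest' ih =>
    by_cases h : pvKey row = pvKey r
    · have hb : (pvKey row == pvKey r) = true := by simp [h]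
      have : pvRuns (r :: pre) (row :: rest') = pvRuns (r :: (pre ++ [row])) rest' := by
        simp [pvRuns, h]
      rw [this, ih, List.takeWhile_cons, hb, List.dropWhile_cons, hb]
      simp
    · have hb : (pvKey row == pvKey r) = false := by simp [h]
      have : pvRuns (r :: pre) (row :: rest') = (r :: pre) :: pvRuns (row :: []) rest' := by
        simp [pvRuns, h]
      rw [this, ih row []]
      rw [List.takeWhile_cons, hb, List.dropWhile_cons, hb]
      simp [split_tiers_alt]

-- ===== VERDICT (by name: the statement is the Claim_ definition above) =====
theorem split_tiers_spec : Claim_equal_split_tiers := by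
  intro rows _ _
  unfold Spec_split_tiers
  cases rows with
  | nil => simp [split_tiers, split_tiers_alt]
  | cons r rest =>
    show List.foldl pvStep [[r]] rest = _
    have h0 : ([[r]] : List (List (List (String × Int)))) = [] ++ [[r]] := rfl
    rw [h0, foldl_step_eq_runs, runs_eq_alt rest r []]
    simp [split_tiers_alt]
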